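-- pv_equiv track=rewrite | github.com/jonnyderme/Analysis-and-Design-of-Algorithms | Assignment/Python Code/Demo_p1.py | feasible_route_exists
-- ===== SOURCE A (Python) =====
-- from collections import deque, defaultdict
--
-- def feasible_route_exists(graph, start, goal, L):
--     V, E = graph
--     E_prime = [(u, v) for (u, v, l_e) in E if l_e <= L]
--
--     # Build adjacency list for the filtered graph
--     adj_list = defaultdict(list)
--     for (u, v) in E_prime:
--         adj_list[u].append(v)
--         adj_list[v].append(u)
--
--     # BFS to check if there's a path from start to goal
--     def bfs(start, goal):
--         queue = deque([start])
--         visited = set([start])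
--
--         while queue:
--             current = queue.popleft()
--             if current == goal:
--                 return True
--             for neighbor in adj_list[current]:
--                 if neighbor not in visited:
--                     visited.add(neighbor)
--                     queue.append(neighbor)
--         return False
--
--     return bfs(start, goal)
-- ===== SOURCE B (Python) =====
-- def feasible_route_exists(graph, start, goal, L):
--     # Label propagation over the filtered edge list: grow the set of nodes
--     # connected to start by full passes over the edges until a pass adds nothing.
--     V, E = graph
--     ep = [(u, v) for (u, v, l_e) in E if l_e <= L]
--     reach = {start}
--     for _ in range(2 * len(ep) + 1):
--         old = len(reach)
--         for (u, v) in ep: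
--             if u in reach or v in reach:
--                 reach.add(u)
--                 reach.add(v)
--         if len(reach) == old:
--             break
--     return goal in reach
-- ===== Notes on version B (the rewrite author's own statement) =====
-- stated objective: alternative
-- what changed: Replaces BFS with an explicit queue, visited set and adjacency dict by label propagation: repeated full passes over the filtered edge list growing the set of nodes connected to start until a pass adds nothing (no adjacency list, no queue).
import Mathlib
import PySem

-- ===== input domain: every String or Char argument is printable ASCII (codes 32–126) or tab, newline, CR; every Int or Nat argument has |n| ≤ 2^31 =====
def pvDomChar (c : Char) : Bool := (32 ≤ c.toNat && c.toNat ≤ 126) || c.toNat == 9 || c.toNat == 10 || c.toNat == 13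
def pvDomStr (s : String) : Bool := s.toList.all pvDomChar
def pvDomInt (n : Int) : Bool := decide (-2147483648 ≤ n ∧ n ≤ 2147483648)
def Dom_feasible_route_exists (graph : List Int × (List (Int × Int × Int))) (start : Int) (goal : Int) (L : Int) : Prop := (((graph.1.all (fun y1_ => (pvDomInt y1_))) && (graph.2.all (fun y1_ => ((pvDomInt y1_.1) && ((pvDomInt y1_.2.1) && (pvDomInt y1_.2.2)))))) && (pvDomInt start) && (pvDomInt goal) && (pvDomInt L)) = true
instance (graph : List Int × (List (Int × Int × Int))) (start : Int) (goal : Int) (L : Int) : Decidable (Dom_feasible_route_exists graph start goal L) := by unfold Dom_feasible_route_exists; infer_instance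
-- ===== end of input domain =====

-- B replaces A's BFS (adjacency dict + queue + visited set) by label propagation over the
-- filtered edge list (alternative decomposition; not claimed faster).

-- ===== PORT A =====
-- E_prime = [(u, v) for (u, v, l_e) in E if l_e <= L]   (shared by both ports: B's Python builds it identically)
def fre_eprime (E : List (Int × Int × Int)) (L : Int) : List (Int × Int) :=
  (E.filter (fun e => decide (e.2.2 ≤ L))).map (fun e => (e.1, e.2.1))

-- adj_list = defaultdict(list); for (u, v) in E_prime: adj_list[u].append(v); adj_list[v].append(u)
def fre_adj (ep : List (Int × Int)) : PySem.Dict Int (List Int) :=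
  ep.foldl (fun d e => (d.modify e.1 [] (· ++ [e.2])).modify e.2 [] (· ++ [e.1])) PySem.Dict.empty

-- one BFS iteration body: for neighbor in adj_list[current]: if neighbor not in visited: add to visited and queue
def fre_scan (visited : PySem.Set Int) (nbrs : List Int) : PySem.Set Int × List Int :=
  nbrs.foldl
    (fun p n => if PySem.Set.contains p.1 n then p else (PySem.Set.add p.1 n, p.2 ++ [n]))
    (visited, [])

-- the BFS while-loop; fuel is a termination guard only (proved sufficient below)
def fre_bfs (adj : PySem.Dict Int (List Int)) (goal : Int) :
    Nat → List Int → PySem.Set Int → Bool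
  | 0, _, _ => false
  | _ + 1, [], _ => false
  | fuel + 1, current :: rest, visited =>
    if current = goal then true
    else
      let p := fre_scan visited (adj.getD current [])
      fre_bfs adj goal fuel (rest ++ p.2) p.1

def feasible_route_exists (graph : List Int × (List (Int × Int × Int))) (start : Int) (goal : Int) (L : Int) : Bool :=
  let ep := fre_eprime graph.2 L
  let adj := fre_adj ep
  fre_bfs adj goal (2 * ep.length + 2) [start] (PySem.Set.ofList [start])

-- ===== PORT B =====
-- one pass: for (u, v) in ep: if u in reach or v in reach: reach.add(u); reach.add(v)
def fre_pass (ep : List (Int × Int)) (r : PySem.Set Int) : PySem.Set Int :=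
  ep.foldl
    (fun r e =>
      if PySem.Set.contains r e.1 || PySem.Set.contains r e.2 then
        PySem.Set.add (PySem.Set.add r e.1) e.2
      else r)
    r

-- for _ in range(2*len(ep)+1): old = len(reach); <pass>; if len(reach) == old: break
def fre_loopB (ep : List (Int × Int)) : Nat → PySem.Set Int → PySem.Set Int
  | 0, r => r
  | n + 1, r =>
    let r' := fre_pass ep r
    if PySem.Set.len r' = PySem.Set.len r then r' else fre_loopB ep n r'

def feasible_route_exists_alt (graph : List Int × (List (Int × Int × Int))) (start : Int) (goal : Int) (L : Int) : Bool :=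
  let ep := fre_eprime graph.2 L
  PySem.Set.contains (fre_loopB ep (2 * ep.length + 1) (PySem.Set.ofList [start])) goal

-- ===== PRECONDITION & SPEC =====
def Spec_feasible_route_exists (graph : List Int × (List (Int × Int × Int))) (start : Int) (goal : Int) (L : Int) (out : Bool) : Prop := out = feasible_route_exists_alt graph start goal L
instance (graph : List Int × (List (Int × Int × Int))) (start : Int) (goal : Int) (L : Int) (out : Bool) : Decidable (Spec_feasible_route_exists graph start goal L out) := by unfold Spec_feasible_route_exists; infer_instance

-- ===== CLAIM (what is proved, stated in full; the proofs are below) =====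
def Claim_equal_feasible_route_exists : Prop := ∀ (graph : List Int × (List (Int × Int × Int))) (start : Int) (goal : Int) (L : Int), Dom_feasible_route_exists graph start goal L → Spec_feasible_route_exists graph start goal L (feasible_route_exists graph start goal L)

-- ===== LEMMAS AND PROOFS =====

-- the undirected step relation of the filtered edge list
def fre_Rel (ep : List (Int × Int)) (x y : Int) : Prop :=
  ∃ e ∈ ep, (e.1 = x ∧ e.2 = y) ∨ (e.2 = x ∧ e.1 = y)

-- the node universe: start plus all endpoints of filtered edges
def fre_U (ep : List (Int × Int)) (start : Int) : List Int :=
  start :: ep.flatMap (fun e => [e.1, e.2])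

theorem fre_U_length (ep : List (Int × Int)) (start : Int) :
    (fre_U ep start).length = 2 * ep.length + 1 := by
  induction ep with
  | nil => simp [fre_U]
  | cons e t ih => simp [fre_U] at *; omega

-- reachability stays inside a closed set (any step relation)
theorem fre_closed_reach {R : Int → Int → Prop} {S : Int → Prop}
    (hcl : ∀ x y, S x → R x y → S y) :
    ∀ a b, Relation.ReflTransGen R a b → S a → S b := by
  intro a b h
  induction h with
  | refl => exact id
  | tail _ h2 ih => exact fun ha => hcl _ _ (ih ha) h2

-- endpoints of the relation lie in the universe
theorem fre_Rel_mem_U {ep : List (Int × Int)} {x y : Int} (start : Int) (h : fre_Rel ep x y) :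
    y ∈ fre_U ep start := by
  obtain ⟨e, he, h⟩ := h
  simp only [fre_U, List.mem_cons, List.mem_flatMap]
  right
  exact ⟨e, he, by rcases h with ⟨_, h2⟩ | ⟨_, h2⟩ <;> simp [← h2]⟩

-- ===== A-side: the adjacency dict realises fre_Rel =====
theorem fre_adj_getD (ep : List (Int × Int)) (x : Int) :
    (fre_adj ep).getD x [] =
      ((ep.flatMap (fun e => [(e.1, e.2), (e.2, e.1)])).filter (fun p => p.1 == x)).map (·.2) := by
  have key : ∀ (l : List (Int × Int)) (d : PySem.Dict Int (List Int)),
      l.foldl (fun d e => (d.modify e.1 [] (· ++ [e.2])).modify e.2 [] (· ++ [e.1])) d =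
      (l.flatMap (fun e => [(e.1, e.2), (e.2, e.1)])).foldl
        (fun d p => d.modify p.1 [] (· ++ [p.2])) d := by
    intro l
    induction l with
    | nil => intro d; rfl
    | cons e t ih => intro d; simp only [List.foldl_cons, List.flatMap_cons, List.foldl_append, ih]; rfl
  rw [fre_adj, key, PySem.Dict.getD_foldl_modify_append]
  simp [PySem.Dict.getD_empty]

theorem fre_mem_adj (ep : List (Int × Int)) (x y : Int) :
    y ∈ (fre_adj ep).getD x [] ↔ fre_Rel ep x y := by
  rw [fre_adj_getD]
  simp only [List.mem_map, List.mem_filter, List.mem_flatMap, fre_Rel]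
  constructor
  · rintro ⟨p, ⟨⟨e, he, hp⟩, hx⟩, hy⟩
    refine ⟨e, he, ?_⟩
    simp only [List.mem_cons] at hp
    rcases hp with rfl | rfl | h
    · exact Or.inl ⟨by simpa using hx, hy⟩
    · exact Or.inr ⟨by simpa using hx, hy⟩
    · simp at h
  · rintro ⟨e, he, ⟨h1, h2⟩ | ⟨h1, h2⟩⟩
    · exact ⟨(e.1, e.2), ⟨⟨e, he, by simp⟩, by simpa using h1⟩, h2⟩
    · exact ⟨(e.2, e.1), ⟨⟨e, he, by simp⟩, by simpa using h1⟩, h2⟩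

-- ===== A-side: the neighbour scan =====
theorem fre_scan_aux :
    ∀ (nbrs : List Int) (vis : PySem.Set Int) (acc : List Int), vis.Nodup →
      ∃ t, nbrs.foldl
          (fun p n => if PySem.Set.contains p.1 n then p else (PySem.Set.add p.1 n, p.2 ++ [n]))
          (vis, acc) = (vis ++ t, acc ++ t) ∧ (vis ++ t).Nodup ∧
        (∀ x, x ∈ vis ++ t ↔ x ∈ vis ∨ x ∈ nbrs) ∧ (∀ x ∈ t, x ∈ nbrs) := by
  intro nbrs
  induction nbrs with
  | nil => intro vis acc hnd; exact ⟨[], by simp, by simpa using hnd, by simp, by simp⟩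
  | cons n ns ih =>
    intro vis acc hnd
    simp only [List.foldl_cons]
    by_cases hn : n ∈ vis
    · rw [if_pos (by simpa [PySem.Set.contains_iff] using hn)]
      obtain ⟨t, h1, h2, h3, h4⟩ := ih vis acc hnd
      refine ⟨t, h1, h2, fun x => ?_, fun x hx => List.mem_cons_of_mem _ (h4 x hx)⟩
      rw [h3 x]
      constructor
      · rintro (h | h) <;> simp [h]
      · rintro (h | h)
        · exact Or.inl h
        · rcases List.mem_cons.mp h with rfl | h
          · exact Or.inl hn
          · exact Or.inr h
    · rw [if_neg (by simpa [PySem.Set.contains_iff] using hn)]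
      have hadd : PySem.Set.add vis n = vis ++ [n] := PySem.Set.add_of_not_mem hn
      have hnd' : (PySem.Set.add vis n).Nodup := PySem.Set.nodup_add vis n hnd
      obtain ⟨t, h1, h2, h3, h4⟩ := ih (PySem.Set.add vis n) (acc ++ [n]) hnd'
      rw [hadd] at h1 h2 h3
      refine ⟨[n] ++ t, ?_, by simpa using h2, fun x => ?_, fun x hx => ?_⟩
      · rw [hadd, h1]; simp
      · rw [show vis ++ ([n] ++ t) = (vis ++ [n]) ++ t by simp, h3 x]
        simp only [List.mem_append, List.mem_cons]
        tauto
      · rcases List.mem_append.mp hx with h | h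
        · simp only [List.mem_singleton] at h; simp [h]
        · exact List.mem_cons_of_mem _ (h4 x h)

theorem fre_scan_spec (nbrs : List Int) (vis : PySem.Set Int) (hnd : vis.Nodup) :
    ∃ t, fre_scan vis nbrs = (vis ++ t, t) ∧ (vis ++ t).Nodup ∧
      (∀ x, x ∈ vis ++ t ↔ x ∈ vis ∨ x ∈ nbrs) ∧ (∀ x ∈ t, x ∈ nbrs) := by
  obtain ⟨t, h1, h2, h3, h4⟩ := fre_scan_aux nbrs vis [] hnd
  exact ⟨t, by simpa [fre_scan] using h1, h2, h3, h4⟩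

-- ===== A-side: BFS main invariant lemma =====
theorem fre_bfs_spec (adj : PySem.Dict Int (List Int)) (goal : Int) (U : List Int)
    (hN : ∀ x y, y ∈ adj.getD x [] → y ∈ U) :
    ∀ fuel queue visited,
      visited.Nodup →
      (∀ x ∈ visited, x ∈ U) →
      (∀ x ∈ queue, x ∈ visited) →
      (∀ x ∈ visited, x ∈ queue ∨ ∀ y ∈ adj.getD x [], y ∈ visited) →
      (goal ∈ visited → goal ∈ queue) →
      queue.length + (U.toFinset.card - visited.length) < fuel →
      (fre_bfs adj goal fuel queue visited = true ↔
        ∃ x ∈ visited, Relation.ReflTransGen (fun a b => b ∈ adj.getD a []) x goal) := by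
  intro fuel
  induction fuel with
  | zero => intro queue visited _ _ _ _ _ h6; omega
  | succ fuel ih =>
    intro queue visited h1 h2 h3 h4 h5 h6
    match queue with
    | [] =>
      simp only [fre_bfs, Bool.false_eq_true, false_iff]
      rintro ⟨x, hx, hr⟩
      have hcl : ∀ a b, a ∈ visited → b ∈ adj.getD a [] → b ∈ visited := by
        intro a b ha hb
        rcases h4 a ha with h | h
        · exact absurd h (List.not_mem_nil)
        · exact h b hb
      have : goal ∈ visited := fre_closed_reach hcl x goal hr hx
      exact absurd (h5 this) (List.not_mem_nil)
    | current :: rest =>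
      by_cases hcg : current = goal
      · subst hcg
        exact iff_of_true (by simp [fre_bfs])
          ⟨current, h3 current List.mem_cons_self, Relation.ReflTransGen.refl⟩
      · obtain ⟨t, hp, hnd', hmem, htn⟩ := fre_scan_spec (adj.getD current []) visited h1
        have hstep : fre_bfs adj goal (fuel + 1) (current :: rest) visited =
            fre_bfs adj goal fuel (rest ++ t) (visited ++ t) := by
          simp only [fre_bfs, if_neg hcg, hp]
        rw [hstep]
        have hcur : current ∈ visited := h3 current List.mem_cons_self
        have hlen : (visited ++ t).length ≤ U.toFinset.card := by
          have hsub : ∀ x ∈ visited ++ t, x ∈ U := by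
            intro x hx
            rcases List.mem_append.mp hx with h | h
            · exact h2 x h
            · exact hN current x (htn x h)
          calc (visited ++ t).length = (visited ++ t).toFinset.card :=
                (List.toFinset_card_of_nodup hnd').symm
            _ ≤ U.toFinset.card := by
                apply Finset.card_le_card
                intro a ha
                simp only [List.mem_toFinset] at ha ⊢
                exact hsub a ha
        rw [ih (rest ++ t) (visited ++ t) hnd'
          (by intro x hx
              rcases List.mem_append.mp hx with h | h
              · exact h2 x h
              · exact hN current x (htn x h))
          (by intro x hx
              rcases List.mem_append.mp hx with h | h
              · exact List.mem_append_left _ (h3 x (List.mem_cons_of_mem _ h))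
              · exact List.mem_append_right _ h)
          (by intro x hx
              rcases List.mem_append.mp hx with h | h
              · by_cases hxc : x = current
                · subst hxc
                  exact Or.inr (fun y hy => (hmem y).mpr (Or.inr hy))
                · rcases h4 x h with h' | h'
                  · rcases List.mem_cons.mp h' with h'' | h''
                    · exact absurd h'' hxc
                    · exact Or.inl (List.mem_append_left _ h'')
                  · exact Or.inr (fun y hy => List.mem_append_left _ (h' y hy))
              · exact Or.inl (List.mem_append_right _ h))
          (by intro hg
              rcases List.mem_append.mp hg with h | h
              · rcases List.mem_cons.mp (h5 h) with h'' | h''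
                · exact absurd h''.symm hcg
                · exact List.mem_append_left _ h''
              · exact List.mem_append_right _ h)
          (by have hl := hlen
              simp only [List.length_append, List.length_cons] at hl h6 ⊢
              omega)]
        constructor
        · rintro ⟨x, hx, hr⟩
          rcases List.mem_append.mp hx with h | h
          · exact ⟨x, h, hr⟩
          · exact ⟨current, hcur, Relation.ReflTransGen.head (htn x h) hr⟩
        · rintro ⟨x, hx, hr⟩
          exact ⟨x, List.mem_append_left _ hx, hr⟩

theorem fre_A_char (ep : List (Int × Int)) (start goal : Int) :
    fre_bfs (fre_adj ep) goal (2 * ep.length + 2) [start] (PySem.Set.ofList [start]) = true ↔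
      Relation.ReflTransGen (fre_Rel ep) start goal := by
  have hofl : PySem.Set.ofList [start] = [start] := by
    simp [PySem.Set.ofList]
  have hN : ∀ x y, y ∈ (fre_adj ep).getD x [] → y ∈ fre_U ep start := by
    intro x y hy
    exact fre_Rel_mem_U start ((fre_mem_adj ep x y).mp hy)
  have hcard : (fre_U ep start).toFinset.card ≤ 2 * ep.length + 1 := by
    calc (fre_U ep start).toFinset.card ≤ (fre_U ep start).length := List.toFinset_card_le _
      _ = 2 * ep.length + 1 := fre_U_length ep start
  rw [hofl, fre_bfs_spec (fre_adj ep) goal (fre_U ep start) hN (2 * ep.length + 2) [start] [start]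
    (by simp) (by intro x hx; simp only [List.mem_singleton] at hx; simp [hx, fre_U])
    (fun x hx => hx) (fun x hx => Or.inl hx) (fun h => h)
    (by simp only [List.length_singleton]; omega)]
  constructor
  · rintro ⟨x, hx, hr⟩
    simp only [List.mem_singleton] at hx
    subst hx
    exact hr.mono (fun a b h => (fre_mem_adj ep a b).mp h)
  · intro h
    exact ⟨start, List.mem_singleton_self start,
      h.mono (fun a b h => (fre_mem_adj ep a b).mpr h)⟩

-- ===== B-side =====
-- one pass only appends
theorem fre_add_append (r : PySem.Set Int) (x : Int) : ∃ u, PySem.Set.add r x = r ++ u := by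
  rw [PySem.Set.add_eq_ite]
  split
  · exact ⟨[], by simp⟩
  · exact ⟨[x], rfl⟩

theorem fre_pass_append (ep : List (Int × Int)) (r : PySem.Set Int) :
    ∃ t, fre_pass ep r = r ++ t := by
  induction ep generalizing r with
  | nil => exact ⟨[], by simp [fre_pass]⟩
  | cons e es ih =>
    have hstep : ∃ u, (if PySem.Set.contains r e.1 || PySem.Set.contains r e.2 then
        PySem.Set.add (PySem.Set.add r e.1) e.2 else r) = r ++ u := by
      split
      · obtain ⟨u1, hu1⟩ := fre_add_append r e.1
        obtain ⟨u2, hu2⟩ := fre_add_append (PySem.Set.add r e.1) e.2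
        exact ⟨u1 ++ u2, by rw [hu2, hu1, List.append_assoc]⟩
      · exact ⟨[], by simp⟩
    obtain ⟨u, hu⟩ := hstep
    obtain ⟨t, ht⟩ := ih (r ++ u)
    refine ⟨u ++ t, ?_⟩
    simp only [fre_pass, List.foldl_cons] at ht ⊢
    rw [hu, ht, List.append_assoc]

theorem fre_pass_nodup {ep : List (Int × Int)} {r : PySem.Set Int} (h : r.Nodup) :
    (fre_pass ep r).Nodup := by
  induction ep generalizing r with
  | nil => simpa [fre_pass] using h
  | cons e es ih =>
    simp only [fre_pass, List.foldl_cons] at ih ⊢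
    apply ih
    split
    · exact PySem.Set.nodup_add _ _ (PySem.Set.nodup_add _ _ h)
    · exact h

theorem fre_pass_mem_of_mem {ep : List (Int × Int)} {r : PySem.Set Int} {x : Int}
    (h : x ∈ r) : x ∈ fre_pass ep r := by
  obtain ⟨t, ht⟩ := fre_pass_append ep r
  rw [ht]
  exact List.mem_append_left _ h

-- every new element is an endpoint of ep
theorem fre_pass_subset {ep : List (Int × Int)} {r : PySem.Set Int} {x : Int}
    (h : x ∈ fre_pass ep r) : x ∈ r ∨ x ∈ ep.flatMap (fun e => [e.1, e.2]) := by
  induction ep generalizing r with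
  | nil => exact Or.inl (by simpa [fre_pass] using h)
  | cons e es ih =>
    simp only [fre_pass, List.foldl_cons] at h
    rcases ih (r := _) h with h' | h'
    · split at h'
      · rcases (PySem.Set.mem_add _ _ _).mp h' with h'' | h''
        · rcases (PySem.Set.mem_add _ _ _).mp h'' with h3 | h3
          · exact Or.inl h3
          · exact Or.inr (by simp [h3])
        · exact Or.inr (by simp [h''])
      · exact Or.inl h'
    · exact Or.inr (by simp only [List.flatMap_cons, List.mem_append]; exact Or.inr h')

-- soundness of one pass
theorem fre_pass_sound_aux {ep : List (Int × Int)} {start : Int} :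
    ∀ (l : List (Int × Int)) (r : PySem.Set Int), (∀ e ∈ l, e ∈ ep) →
      (∀ x ∈ r, Relation.ReflTransGen (fre_Rel ep) start x) →
      ∀ x ∈ l.foldl
        (fun r e =>
          if PySem.Set.contains r e.1 || PySem.Set.contains r e.2 then
            PySem.Set.add (PySem.Set.add r e.1) e.2
          else r) r, Relation.ReflTransGen (fre_Rel ep) start x := by
  intro l
  induction l with
  | nil => intro r _ h x hx; exact h x hx
  | cons e es ih =>
    intro r hl h x hx
    simp only [List.foldl_cons] at hx
    refine ih _ (fun e' he' => hl e' (List.mem_cons_of_mem _ he')) ?_ x hx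
    intro y hy
    split at hy
    · rename_i hc
      rcases (PySem.Set.mem_add _ _ _).mp hy with hy' | hy'
      · rcases (PySem.Set.mem_add _ _ _).mp hy' with h3 | h3
        · exact h y h3
        · subst h3
          rcases Bool.or_eq_true_iff.mp hc with hc' | hc'
          · exact h _ ((PySem.Set.contains_iff _ _).mp hc')
          · exact (h _ ((PySem.Set.contains_iff _ _).mp hc')).tail
              ⟨e, hl e List.mem_cons_self, Or.inr ⟨rfl, rfl⟩⟩
      · subst hy'
        rcases Bool.or_eq_true_iff.mp hc with hc' | hc'
        · exact (h _ ((PySem.Set.contains_iff _ _).mp hc')).tail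
            ⟨e, hl e List.mem_cons_self, Or.inl ⟨rfl, rfl⟩⟩
        · exact h _ ((PySem.Set.contains_iff _ _).mp hc')
    · exact h y hy

theorem fre_pass_sound {ep : List (Int × Int)} {r : PySem.Set Int} {start : Int}
    (h : ∀ x ∈ r, Relation.ReflTransGen (fre_Rel ep) start x) :
    ∀ x ∈ fre_pass ep r, Relation.ReflTransGen (fre_Rel ep) start x :=
  fre_pass_sound_aux ep r (fun _ he => he) h

-- one pass closes every edge touching r
theorem fre_pass_closes {ep : List (Int × Int)} {r : PySem.Set Int} {e : Int × Int}
    (he : e ∈ ep) (h : e.1 ∈ r ∨ e.2 ∈ r) : e.1 ∈ fre_pass ep r ∧ e.2 ∈ fre_pass ep r := by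
  induction ep generalizing r with
  | nil => exact absurd he (List.not_mem_nil)
  | cons e' es ih =>
    simp only [fre_pass, List.foldl_cons] at ih ⊢
    rcases List.mem_cons.mp he with rfl | he'
    · have hc : (PySem.Set.contains r e.1 || PySem.Set.contains r e.2) = true := by
        rcases h with h | h
        · exact Bool.or_eq_true_iff.mpr (Or.inl ((PySem.Set.contains_iff _ _).mpr h))
        · exact Bool.or_eq_true_iff.mpr (Or.inr ((PySem.Set.contains_iff _ _).mpr h))
      rw [hc]
      simp only [if_true]
      have h1 : e.1 ∈ PySem.Set.add (PySem.Set.add r e.1) e.2 :=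
        (PySem.Set.mem_add _ _ _).mpr (Or.inl ((PySem.Set.mem_add _ _ _).mpr (Or.inr rfl)))
      have h2 : e.2 ∈ PySem.Set.add (PySem.Set.add r e.1) e.2 :=
        (PySem.Set.mem_add _ _ _).mpr (Or.inr rfl)
      obtain ⟨t, ht⟩ := fre_pass_append es (PySem.Set.add (PySem.Set.add r e.1) e.2)
      simp only [fre_pass] at ht
      rw [ht]
      exact ⟨List.mem_append_left _ h1, List.mem_append_left _ h2⟩
    · apply ih he'
      obtain ⟨u, hu⟩ : ∃ u, (if PySem.Set.contains r e'.1 || PySem.Set.contains r e'.2 then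
          PySem.Set.add (PySem.Set.add r e'.1) e'.2 else r) = r ++ u := by
        split
        · obtain ⟨u1, hu1⟩ := fre_add_append r e'.1
          obtain ⟨u2, hu2⟩ := fre_add_append (PySem.Set.add r e'.1) e'.2
          exact ⟨u1 ++ u2, by rw [hu2, hu1, List.append_assoc]⟩
        · exact ⟨[], by simp⟩
      rw [hu]
      rcases h with h | h
      · exact Or.inl (List.mem_append_left _ h)
      · exact Or.inr (List.mem_append_left _ h)

theorem fre_len_le {r U : List Int} (hnd : r.Nodup) (hsub : ∀ x ∈ r, x ∈ U) :
    r.length ≤ U.toFinset.card := by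
  calc r.length = r.toFinset.card := (List.toFinset_card_of_nodup hnd).symm
    _ ≤ _ := Finset.card_le_card (by
        intro a ha
        simp only [List.mem_toFinset] at ha ⊢
        exact hsub a ha)

-- the loop always ends in a fixpoint of fre_pass (its fuel is sufficient)
theorem fre_loopB_fix (ep : List (Int × Int)) (U : List Int)
    (hE : ∀ x ∈ ep.flatMap (fun e => [e.1, e.2]), x ∈ U) :
    ∀ n r, r.Nodup → (∀ x ∈ r, x ∈ U) → U.toFinset.card < n + r.length →
      fre_pass ep (fre_loopB ep n r) = fre_loopB ep n r := by
  intro n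
  induction n with
  | zero =>
    intro r h1 h2 h3
    exact absurd (fre_len_le h1 h2) (by omega)
  | succ n ih =>
    intro r h1 h2 h3
    obtain ⟨t, ht⟩ := fre_pass_append ep r
    simp only [fre_loopB]
    by_cases hlen : PySem.Set.len (fre_pass ep r) = PySem.Set.len r
    · rw [if_pos hlen]
      have ht0 : t = [] := by
        simp only [PySem.Set.len, ht, List.length_append] at hlen
        have : t.length = 0 := by omega
        exact List.length_eq_zero_iff.mp this
      have hrr : fre_pass ep r = r := by rw [ht, ht0, List.append_nil]
      rw [hrr]
      exact hrr
    · rw [if_neg hlen]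
      apply ih
      · exact fre_pass_nodup h1
      · intro x hx
        rcases fre_pass_subset hx with h | h
        · exact h2 x h
        · exact hE x h
      · have ht0 : t ≠ [] := by
          intro h0
          exact hlen (by rw [ht, h0, List.append_nil])
        have : 1 ≤ t.length := by
          cases t with
          | nil => exact absurd rfl ht0
          | cons a b => simp
        rw [ht, List.length_append]
        omega

theorem fre_loopB_super (ep : List (Int × Int)) :
    ∀ n r x, x ∈ r → x ∈ fre_loopB ep n r := by
  intro n
  induction n with
  | zero => exact fun r x h => h
  | succ n ih =>
    intro r x h
    simp only [fre_loopB]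
    split
    · exact fre_pass_mem_of_mem h
    · exact ih _ x (fre_pass_mem_of_mem h)

theorem fre_loopB_sound (ep : List (Int × Int)) (start : Int) :
    ∀ n r, (∀ x ∈ r, Relation.ReflTransGen (fre_Rel ep) start x) →
      ∀ x ∈ fre_loopB ep n r, Relation.ReflTransGen (fre_Rel ep) start x := by
  intro n
  induction n with
  | zero => exact fun r h => h
  | succ n ih =>
    intro r h
    simp only [fre_loopB]
    split
    · exact fre_pass_sound h
    · exact ih _ (fre_pass_sound h)

theorem fre_B_char (ep : List (Int × Int)) (start goal : Int) :
    goal ∈ fre_loopB ep (2 * ep.length + 1) (PySem.Set.ofList [start]) ↔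
      Relation.ReflTransGen (fre_Rel ep) start goal := by
  have hofl : PySem.Set.ofList [start] = [start] := by
    simp [PySem.Set.ofList]
  rw [hofl]
  have hE : ∀ x ∈ ep.flatMap (fun e => [e.1, e.2]), x ∈ fre_U ep start := by
    intro x hx
    exact List.mem_cons_of_mem _ hx
  have hfix := fre_loopB_fix ep (fre_U ep start) hE (2 * ep.length + 1) [start]
    (by simp)
    (by intro x hx
        simp only [List.mem_singleton] at hx
        simp [hx, fre_U])
    (by have h1 := List.toFinset_card_le (fre_U ep start)
        have h2 := fre_U_length ep start
        simp only [List.length_singleton]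
        omega)
  constructor
  · intro hgoal
    exact fre_loopB_sound ep start (2 * ep.length + 1) [start]
      (by intro x hx
          simp only [List.mem_singleton] at hx
          subst hx
          exact Relation.ReflTransGen.refl) goal hgoal
  · intro h
    have hstart : start ∈ fre_loopB ep (2 * ep.length + 1) [start] :=
      fre_loopB_super ep _ [start] start (List.mem_singleton_self start)
    have hcl : ∀ x y, x ∈ fre_loopB ep (2 * ep.length + 1) [start] → fre_Rel ep x y →
        y ∈ fre_loopB ep (2 * ep.length + 1) [start] := by
      rintro x y hx ⟨e, he, ⟨h1, h2⟩ | ⟨h1, h2⟩⟩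
      · have hc := fre_pass_closes he (Or.inl (by rw [h1]; exact hx))
        rw [hfix] at hc
        rw [← h2]
        exact hc.2
      · have hc := fre_pass_closes he (Or.inr (by rw [h1]; exact hx))
        rw [hfix] at hc
        rw [← h2]
        exact hc.1
    exact fre_closed_reach hcl start goal h hstart

-- ===== VERDICT (by name: the statement is the Claim_ definition above) =====
theorem feasible_route_exists_spec : Claim_equal_feasible_route_exists := by
  intro graph start goal L _
  unfold Spec_feasible_route_exists
  unfold feasible_route_exists feasible_route_exists_alt
  rw [Bool.eq_iff_iff]
  rw [PySem.Set.contains_iff]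
  exact (fre_A_char _ start goal).trans (fre_B_char _ start goal).symm
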